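-- pv_equiv track=rewrite | github.com/ad3ph/iypt_bracket_gen | utils/check_clusters.py | check_bracket
-- ===== SOURCE A (Python) =====
-- def never_play_together(test_team, list_of_teams, bracket):
--     for second_team in list_of_teams:
--         for fight in bracket:
--             for room in fight:
--                 if second_team in room and test_team in room:
--                     return False
--     return True
--
-- def check_bracket(bracket, num_fights, num_teams):
--     teams = [x for x in range(1, num_teams+1)]
--
--     clusters = []
--     for team in teams:
--         found = False
--         for cluster in clusters:
--             if never_play_together(team, cluster, bracket):
--                 cluster.append(team)
--                 found = True
--                 break
--         if not found:
--             clusters.append([team, ])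
--     return [x for x in clusters if len(x) > 1]
-- ===== SOURCE B (Python) =====
-- def check_bracket(bracket, num_fights, num_teams):
--     pairs = set()
--     for fight in bracket:
--         for room in fight:
--             for a in room:
--                 for b in room:
--                     pairs.add((a, b))
--     clusters = []
--     remaining = list(range(1, num_teams + 1))
--     while remaining:
--         cluster = []
--         rest = []
--         for t in remaining:
--             if all((s, t) not in pairs for s in cluster):
--                 cluster.append(t)
--             else:
--                 rest.append(t)
--         clusters.append(cluster)
--         remaining = rest
--     return [c for c in clusters if len(c) > 1]
-- ===== Notes on version B (the rewrite author's own statement) =====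
-- stated objective: faster
-- what changed: B precomputes the co-occurrence pair set in one bracket pass and then builds clusters cluster-by-cluster (repeatedly extracting one maximal greedy cluster from the remaining teams), instead of A's team-by-team scan over the cluster list with a full bracket rescan per compatibility test.
import Mathlib
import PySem

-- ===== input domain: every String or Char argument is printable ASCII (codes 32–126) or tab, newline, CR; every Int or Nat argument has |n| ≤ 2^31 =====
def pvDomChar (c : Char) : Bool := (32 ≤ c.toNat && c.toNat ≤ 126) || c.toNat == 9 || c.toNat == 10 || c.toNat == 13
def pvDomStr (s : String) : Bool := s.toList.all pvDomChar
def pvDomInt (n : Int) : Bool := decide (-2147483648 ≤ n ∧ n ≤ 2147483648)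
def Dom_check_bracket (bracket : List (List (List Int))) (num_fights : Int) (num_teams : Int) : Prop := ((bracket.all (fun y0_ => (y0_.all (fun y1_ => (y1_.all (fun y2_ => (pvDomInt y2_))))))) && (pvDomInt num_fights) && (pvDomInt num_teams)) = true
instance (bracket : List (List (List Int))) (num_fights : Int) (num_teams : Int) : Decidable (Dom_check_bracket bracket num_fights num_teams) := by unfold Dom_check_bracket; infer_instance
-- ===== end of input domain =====

-- B precomputes the co-occurrence pair set in one bracket pass and then builds the clusters
-- cluster-by-cluster (repeated maximal greedy extraction) instead of A's team-by-team
-- first-fit over the cluster list with a bracket rescan per test (objective: faster).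

-- ===== PORT A =====
-- early-return triple loop: any/contains short-circuit exactly like Python's returns
def never_play_together (test_team : Int) (list_of_teams : List Int) (bracket : List (List (List Int))) : Bool :=
  !(list_of_teams.any fun second_team =>
      bracket.any fun fight =>
        fight.any fun room => room.contains second_team && room.contains test_team)

-- A's inner clusters loop for one team: append to the first fitting cluster, else a new one
def aPlace (bracket : List (List (List Int))) (team : Int) : List (List Int) → List (List Int)
  | [] => [[team]]
  | c :: rest =>
      if never_play_together team c bracket then (c ++ [team]) :: rest
      else c :: aPlace bracket team rest

def check_bracket (bracket : List (List (List Int))) (num_fights : Int) (num_teams : Int) : List (List Int) :=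
  let teams := PySem.List.pyRange 1 (num_teams + 1) 1
  let clusters := teams.foldl (fun cl team => aPlace bracket team cl) []
  clusters.filter (fun x => decide (x.length > 1))

-- ===== PORT B =====
-- one pass over the bracket collecting every same-room ordered pair into a Python set
def build_pairs (bracket : List (List (List Int))) : PySem.Set (Int × Int) :=
  bracket.foldl (fun P fight =>
    fight.foldl (fun P room =>
      room.foldl (fun P a =>
        room.foldl (fun P b => PySem.Set.add P (a, b)) P) P) P) PySem.Set.empty

-- the inner 'for t in remaining' loop: grow (cluster, rest) by one team
def splitStep (pairs : PySem.Set (Int × Int)) (st : List Int × List Int) (t : Int) :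
    List Int × List Int :=
  if st.1.all (fun s => !(PySem.Set.contains pairs (s, t))) then (st.1 ++ [t], st.2)
  else (st.1, st.2 ++ [t])

-- the rejected side never outgrows rej ++ the teams scanned (for peel's termination)
theorem splitStep_rej_le (pairs : PySem.Set (Int × Int)) :
    ∀ (ts : List Int) (cl rej : List Int),
      ((ts.foldl (splitStep pairs) (cl, rej)).2).length ≤ rej.length + ts.length := by
  intro ts
  induction ts with
  | nil => intro cl rej; simp
  | cons t ts ih =>
      intro cl rej
      simp only [List.foldl_cons, splitStep, List.length_cons]
      split
      · exact le_trans (ih _ _) (by omega)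
      · exact le_trans (ih _ _)
          (by simp only [List.length_append, List.length_cons, List.length_nil]; omega)

-- the 'while remaining' loop: peel one maximal greedy cluster, recurse on the rest
def peel (pairs : PySem.Set (Int × Int)) : List Int → List (List Int)
  | [] => []
  | t :: ts =>
      let p := (t :: ts).foldl (splitStep pairs) ([], [])
      p.1 :: peel pairs p.2
termination_by ts => ts.length
decreasing_by
  simp only [List.foldl_cons, splitStep, List.all_nil, List.nil_append, if_pos, List.length_cons]
  exact Nat.lt_succ_of_le (le_trans (splitStep_rej_le pairs ts [t] []) (by simp))

def check_bracket_alt (bracket : List (List (List Int))) (num_fights : Int) (num_teams : Int) : List (List Int) :=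
  let pairs := build_pairs bracket
  let remaining := PySem.List.pyRange 1 (num_teams + 1) 1
  (peel pairs remaining).filter (fun c => decide (c.length > 1))

-- ===== PRECONDITION & SPEC =====
def Spec_check_bracket (bracket : List (List (List Int))) (num_fights : Int) (num_teams : Int) (out : List (List Int)) : Prop := out = check_bracket_alt bracket num_fights num_teams
instance (bracket : List (List (List Int))) (num_fights : Int) (num_teams : Int) (out : List (List Int)) : Decidable (Spec_check_bracket bracket num_fights num_teams out) := by unfold Spec_check_bracket; infer_instance

-- ===== CLAIM (what is proved, stated in full; the proofs are below) =====
def Claim_equal_check_bracket : Prop := ∀ (bracket : List (List (List Int))) (num_fights : Int) (num_teams : Int), Dom_check_bracket bracket num_fights num_teams → Spec_check_bracket bracket num_fights num_teams (check_bracket bracket num_fights num_teams)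

-- ===== LEMMAS AND PROOFS =====

-- generic membership through a fold whose step adds elements described by Q
theorem mem_foldl_layer {β γ : Type} (g : List γ → β → List γ) (Q : β → γ → Prop)
    (hg : ∀ s b y, y ∈ g s b ↔ y ∈ s ∨ Q b y) :
    ∀ (l : List β) (s : List γ) (y : γ), y ∈ l.foldl g s ↔ y ∈ s ∨ ∃ b ∈ l, Q b y := by
  intro l
  induction l with
  | nil => simp
  | cons b l ih =>
      intro s y
      simp only [List.foldl_cons, ih, hg, List.mem_cons]
      constructor
      · rintro ((h | h) | ⟨c, hc, h⟩)
        · exact Or.inl h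
        · exact Or.inr ⟨b, by simp, h⟩
        · exact Or.inr ⟨c, by simp [hc], h⟩
      · rintro (h | ⟨c, hc, h⟩)
        · exact Or.inl (Or.inl h)
        · rcases hc with hc | hc
          · exact Or.inl (Or.inr (hc ▸ h))
          · exact Or.inr ⟨c, hc, h⟩

theorem mem_build_pairs (bracket : List (List (List Int))) (s t : Int) :
    (s, t) ∈ build_pairs bracket ↔
      ∃ fight ∈ bracket, ∃ room ∈ fight, s ∈ room ∧ t ∈ room := by
  unfold build_pairs
  rw [mem_foldl_layer _ (fun fight y => ∃ room ∈ fight, y.1 ∈ room ∧ y.2 ∈ room)]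
  · simp [PySem.Set.empty]
  · intro sAcc fight y
    rw [mem_foldl_layer _ (fun room y => y.1 ∈ room ∧ y.2 ∈ room)]
    intro sAcc2 room y
    rw [mem_foldl_layer _ (fun a y => y.1 = a ∧ y.2 ∈ room)]
    · constructor
      · rintro (h | ⟨a, ha, h1, h2⟩)
        · exact Or.inl h
        · exact Or.inr ⟨h1 ▸ ha, h2⟩
      · rintro (h | ⟨h1, h2⟩)
        · exact Or.inl h
        · exact Or.inr ⟨y.1, h1, rfl, h2⟩
    · intro sAcc3 a y
      rw [mem_foldl_layer _ (fun b y => y = (a, b))]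
      · constructor
        · rintro (h | ⟨b, hb, rfl⟩)
          · exact Or.inl h
          · exact Or.inr ⟨rfl, hb⟩
        · rintro (h | ⟨h1, h2⟩)
          · exact Or.inl h
          · exact Or.inr ⟨y.2, h2, by cases y; simp_all⟩
      · intro sAcc4 b y
        simp [PySem.Set.mem_add]

-- A's fit test equals B's set-lookup test
theorem fit_eq (bracket : List (List (List Int))) (team : Int) (c : List Int) :
    never_play_together team c bracket
      = c.all (fun s => !(PySem.Set.contains (build_pairs bracket) (s, team))) := by
  unfold never_play_together
  rw [Bool.eq_iff_iff]
  simp [List.any_eq_true, List.all_eq_true, mem_build_pairs]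

-- the rejected accumulator factors out of the split fold
theorem split_rej_factor (pairs : PySem.Set (Int × Int)) :
    ∀ (ts : List Int) (cl rej : List Int),
      ts.foldl (splitStep pairs) (cl, rej)
        = ((ts.foldl (splitStep pairs) (cl, [])).1,
           rej ++ (ts.foldl (splitStep pairs) (cl, [])).2) := by
  intro ts
  induction ts with
  | nil => intro cl rej; simp
  | cons t ts ih =>
      intro cl rej
      simp only [List.foldl_cons, splitStep]
      split
      · exact ih _ _
      · rw [ih (cl) (rej ++ [t]), ih (cl) ([] ++ [t])]
        simp

-- KEY: one round of A's fold over a cluster list (c :: rest) is one split round of B: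
-- the head cluster collects exactly the fitting teams, the rejects fall through to rest
theorem pvRound_eq (bracket : List (List (List Int))) :
    ∀ (ts : List Int) (c : List Int) (rest : List (List Int)),
      ts.foldl (fun cl team => aPlace bracket team cl) (c :: rest)
        = (ts.foldl (splitStep (build_pairs bracket)) (c, [])).1
            :: (ts.foldl (splitStep (build_pairs bracket)) (c, [])).2.foldl
                 (fun cl team => aPlace bracket team cl) rest := by
  intro ts
  induction ts with
  | nil => intro c rest; simp
  | cons t ts ih =>
      intro c rest
      simp only [List.foldl_cons, aPlace, splitStep, fit_eq, List.nil_append]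
      split
      · exact ih _ _
      · rw [split_rej_factor _ ts c [t], ih c (aPlace bracket t rest)]
        simp [List.foldl_cons]

-- A's whole fold is B's peel
theorem fold_eq_peel (bracket : List (List (List Int))) :
    ∀ (n : Nat) (ts : List Int), ts.length ≤ n →
      ts.foldl (fun cl team => aPlace bracket team cl) []
        = peel (build_pairs bracket) ts := by
  intro n
  induction n with
  | zero =>
      intro ts h
      rw [List.length_eq_zero_iff.mp (Nat.le_zero.mp h), peel]
      rfl
  | succ n ih =>
      intro ts h
      match ts with
      | [] => rw [peel]; rfl
      | t :: ts =>
          rw [peel]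
          simp only [List.foldl_cons, splitStep, List.all_nil, List.nil_append, if_pos]
          have h0 : aPlace bracket t [] = [[t]] := rfl
          rw [h0]
          have : ([t] : List Int) = [] ++ [t] := rfl
          rw [pvRound_eq bracket ts [t] []]
          congr 1
          exact ih _ (le_trans (splitStep_rej_le _ ts [t] []) (by simp at h ⊢; omega))

-- ===== VERDICT (by name: the statement is the Claim_ definition above) =====
theorem check_bracket_spec : Claim_equal_check_bracket := by
  intro bracket num_fights num_teams _
  unfold Spec_check_bracket check_bracket check_bracket_alt
  simp only []
  rw [fold_eq_peel bracket (PySem.List.pyRange 1 (num_teams + 1) 1).length _ le_rfl]
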